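-- pv_equiv track=rewrite | github.com/fernunex/Learn2code | 6_functions/07_misa_v2.py | mirko_location
-- ===== SOURCE A (Python) =====
-- def num_neighbours(grid, row, col):
--     last_row = len(grid) - 1
--     last_col = len(grid[0]) - 1
--     total = 0
--
--     # Check all directions
--
--     # Right
--     if col < last_col and grid[row][col + 1] == 'o':
--         total += 1
--     # Left
--     if col > 0 and grid[row][col - 1] == 'o':
--         total += 1
--     # Down
--     if row < last_row and grid[row + 1][col] == 'o':
--         total += 1
--     # Up
--     if row > 0 and grid[row - 1][col] == 'o':
--         total += 1
--     # Right down
--     if col < last_col and row < last_row and grid[row + 1][col + 1] == 'o':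
--         total += 1
--     # Right up
--     if row > 0 and col < last_col and grid[row - 1][col + 1] == 'o':
--         total += 1
--     # Left down
--     if col > 0 and  row < last_row and grid[row + 1][col - 1] == 'o':
--         total += 1
--     # Left up
--     if row > 0 and col > 0 and grid[row - 1][col - 1] == 'o':
--         total += 1
--
--     return total
--
-- def mirko_location(grid):
--     mirko_row, mirko_col = -1, -1
--     most = 0
--     for row in range(len(grid)):
--         for col in range(len(grid[0])):
--             if grid[row][col] == '.':
--                 neighbours = num_neighbours(grid, row, col)
--                 if neighbours > most:
--                     most = neighbours
--                     mirko_row = row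
--                     mirko_col = col
--     return [mirko_row, mirko_col]
-- ===== SOURCE B (Python) =====
-- def mirko_location(grid):
--     h = len(grid)
--     w = len(grid[0]) if grid else 0
--     counts = [[0] * w for _ in range(h)]
--     deltas = ((-1, -1), (-1, 0), (-1, 1), (0, -1), (0, 1), (1, -1), (1, 0), (1, 1))
--     for r in range(h):
--         row = grid[r]
--         for c in range(w):
--             if row[c] == 'o':
--                 for dr, dc in deltas:
--                     nr, nc = r + dr, c + dc
--                     if 0 <= nr < h and 0 <= nc < w:
--                         counts[nr][nc] += 1
--     mirko_row, mirko_col = -1, -1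
--     most = 0
--     for r in range(h):
--         row = grid[r]
--         for c in range(w):
--             if row[c] == '.' and counts[r][c] > most:
--                 most = counts[r][c]
--                 mirko_row, mirko_col = r, c
--     return [mirko_row, mirko_col]
-- ===== Notes on version B (the rewrite author's own statement) =====
-- stated objective: alternative
-- what changed: Replaces per-'.'-cell gathering of the 8 neighbours with a scatter pass that builds a full neighbour-count matrix from the 'o' cells, followed by a separate row-major first-strict-max selection pass over '.' cells.
import Mathlib
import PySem

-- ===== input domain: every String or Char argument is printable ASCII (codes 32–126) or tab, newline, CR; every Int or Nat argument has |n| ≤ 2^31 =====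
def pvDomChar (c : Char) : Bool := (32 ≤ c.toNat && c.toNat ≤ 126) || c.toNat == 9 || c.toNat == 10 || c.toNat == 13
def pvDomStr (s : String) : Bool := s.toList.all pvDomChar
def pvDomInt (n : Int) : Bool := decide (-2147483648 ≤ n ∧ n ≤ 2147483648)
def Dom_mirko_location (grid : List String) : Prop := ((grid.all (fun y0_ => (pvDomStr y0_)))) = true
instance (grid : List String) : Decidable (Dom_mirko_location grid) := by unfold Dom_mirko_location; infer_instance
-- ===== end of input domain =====

-- B replaces A's per-'.'-cell gathering of the 8 neighbours by a scatter pass building a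
-- neighbour-count matrix plus a separate row-major selection pass (alternative decomposition, same cost).


-- ===== PORT A =====
-- grid[r][c]; every real access is in range under Pre_, so the defaults are never read there
def pvCell (grid : List String) (r c : Nat) : Char := ((grid.getD r "").toList.getD c ' ')

def num_neighbours (grid : List String) (row col : Nat) : Int :=
  let lastRow := grid.length - 1
  let lastCol := (grid.headD "").length - 1
  let t0 : Int := 0
  let t1 := if col < lastCol ∧ pvCell grid row (col+1) = 'o' then t0+1 else t0
  let t2 := if 0 < col ∧ pvCell grid row (col-1) = 'o' then t1+1 else t1
  let t3 := if row < lastRow ∧ pvCell grid (row+1) col = 'o' then t2+1 else t2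
  let t4 := if 0 < row ∧ pvCell grid (row-1) col = 'o' then t3+1 else t3
  let t5 := if col < lastCol ∧ row < lastRow ∧ pvCell grid (row+1) (col+1) = 'o' then t4+1 else t4
  let t6 := if 0 < row ∧ col < lastCol ∧ pvCell grid (row-1) (col+1) = 'o' then t5+1 else t5
  let t7 := if 0 < col ∧ row < lastRow ∧ pvCell grid (row+1) (col-1) = 'o' then t6+1 else t6
  let t8 := if 0 < row ∧ 0 < col ∧ pvCell grid (row-1) (col-1) = 'o' then t7+1 else t7
  t8

def mirko_location (grid : List String) : List Int :=
  let st := (List.range grid.length).foldl (fun s row =>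
    (List.range (grid.headD "").length).foldl (fun s col =>
      if pvCell grid row col = '.' then
        if num_neighbours grid row col > s.2.2 then ((row : Int), (col : Int), num_neighbours grid row col) else s
      else s) s) ((-1 : Int), (-1 : Int), (0 : Int))
  [st.1, st.2.1]

-- ===== PORT B =====
def pvEntry (cs : List (List Int)) (r c : Nat) : Int := (cs.getD r []).getD c 0

def pvBump (cs : List (List Int)) (r c : Nat) : List (List Int) :=
  cs.modify r (fun row => row.modify c (· + 1))

def pvDeltas : List (Int × Int) := [(0,1), (0,-1), (1,0), (-1,0), (1,1), (-1,1), (1,-1), (-1,-1)]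

def pvScatter (h w : Nat) (cs : List (List Int)) (r c : Nat) : List (List Int) :=
  pvDeltas.foldl (fun cs d =>
    if 0 ≤ (r : Int) + d.1 ∧ (r : Int) + d.1 < (h : Int) ∧ 0 ≤ (c : Int) + d.2 ∧ (c : Int) + d.2 < (w : Int) then
      pvBump cs ((r : Int) + d.1).toNat ((c : Int) + d.2).toNat
    else cs) cs

def mirko_location_alt (grid : List String) : List Int :=
  let h := grid.length
  let w := (grid.headD "").length
  let counts := (List.range h).foldl (fun cs r =>
    (List.range w).foldl (fun cs c =>
      if pvCell grid r c = 'o' then pvScatter h w cs r c else cs) cs)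
    (List.replicate h (List.replicate w (0 : Int)))
  let st := (List.range h).foldl (fun s r =>
    (List.range w).foldl (fun s c =>
      if pvCell grid r c = '.' ∧ pvEntry counts r c > s.2.2 then ((r : Int), (c : Int), pvEntry counts r c) else s) s)
    ((-1 : Int), (-1 : Int), (0 : Int))
  [st.1, st.2.1]

-- ===== PRECONDITION & SPEC =====
-- Pre_ excludes ragged grids in which some row is shorter than the first row: there A raises IndexError
-- (and B raises too); on every other input A returns normally.
def Pre_mirko_location (grid : List String) : Prop :=
  ∀ s ∈ grid, (grid.headD "").length ≤ s.length
instance (grid : List String) : Decidable (Pre_mirko_location grid) := by unfold Pre_mirko_location; infer_instance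

def pvWitness_mirko_location : List String := ["..o", "oo.", "..."]

def Spec_mirko_location (grid : List String) (out : List Int) : Prop := out = mirko_location_alt grid
instance (grid : List String) (out : List Int) : Decidable (Spec_mirko_location grid out) := by unfold Spec_mirko_location; infer_instance

-- ===== CLAIM (what is proved, stated in full; the proofs are below) =====
def Claim_equal_mirko_location : Prop := ∀ (grid : List String), Dom_mirko_location grid → Pre_mirko_location grid → Spec_mirko_location grid (mirko_location grid)

-- ===== LEMMAS AND PROOFS =====

def pvShape (h w : Nat) (cs : List (List Int)) : Prop :=
  cs.length = h ∧ ∀ k, k < h → (cs.getD k []).length = w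

theorem pv_getD_modify {α : Type} (cs : List α) (i k : Nat) (f : α → α) (d : α) (hk : k < cs.length) :
    (cs.modify i f).getD k d = if i = k then f (cs.getD k d) else cs.getD k d := by
  simp [List.getD_eq_getElem?_getD, List.getElem?_modify, List.getElem?_eq_getElem hk]

theorem pvShape_bump (h w : Nat) (cs : List (List Int)) (i j : Nat) (hs : pvShape h w cs) :
    pvShape h w (pvBump cs i j) := by
  obtain ⟨hl, hrow⟩ := hs
  refine ⟨by simp [pvBump, hl], fun k hk => ?_⟩
  rw [pvBump, pv_getD_modify _ _ _ _ _ (by omega)]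
  split
  · rw [List.length_modify, hrow k hk]
  · exact hrow k hk

theorem pvEntry_bump (h w : Nat) (cs : List (List Int)) (i j r c : Nat) (hs : pvShape h w cs)
    (hr : r < h) (hc : c < w) :
    pvEntry (pvBump cs i j) r c = pvEntry cs r c + (if i = r ∧ j = c then 1 else 0) := by
  obtain ⟨hl, hrow⟩ := hs
  rw [pvEntry, pvBump, pv_getD_modify _ _ _ _ _ (by omega)]
  by_cases hir : i = r
  · rw [if_pos hir]
    have hcl : c < (cs.getD r []).length := by rw [hrow r hr]; exact hc
    rw [pv_getD_modify _ _ _ _ _ hcl]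
    by_cases hjc : j = c
    · rw [if_pos hjc, if_pos ⟨hir, hjc⟩, pvEntry]
    · rw [if_neg hjc, if_neg (by tauto), pvEntry, add_zero]
  · rw [if_neg hir, if_neg (by tauto), pvEntry, add_zero]

def pvHits (R C r c : Nat) : Int :=
  (pvDeltas.countP (fun d => decide ((r : Int) + d.1 = (R : Int) ∧ (c : Int) + d.2 = (C : Int))) : Int)

theorem pvScatter_fold (h w R C r c : Nat) (hR : R < h) (hC : C < w)
    (ds : List (Int × Int)) :
    ∀ (cs : List (List Int)), pvShape h w cs →
      pvShape h w (ds.foldl (fun cs d =>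
        if 0 ≤ (r : Int) + d.1 ∧ (r : Int) + d.1 < (h : Int) ∧ 0 ≤ (c : Int) + d.2 ∧ (c : Int) + d.2 < (w : Int) then
          pvBump cs ((r : Int) + d.1).toNat ((c : Int) + d.2).toNat
        else cs) cs) ∧
      pvEntry (ds.foldl (fun cs d =>
        if 0 ≤ (r : Int) + d.1 ∧ (r : Int) + d.1 < (h : Int) ∧ 0 ≤ (c : Int) + d.2 ∧ (c : Int) + d.2 < (w : Int) then
          pvBump cs ((r : Int) + d.1).toNat ((c : Int) + d.2).toNat
        else cs) cs) R C
        = pvEntry cs R C +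
          (ds.countP (fun d => decide ((r : Int) + d.1 = (R : Int) ∧ (c : Int) + d.2 = (C : Int))) : Int) := by
  induction ds with
  | nil => intro cs hs; exact ⟨hs, by simp⟩
  | cons d ds ih =>
    intro cs hs
    rw [List.foldl_cons]
    by_cases hin : 0 ≤ (r : Int) + d.1 ∧ (r : Int) + d.1 < (h : Int) ∧ 0 ≤ (c : Int) + d.2 ∧ (c : Int) + d.2 < (w : Int)
    · rw [if_pos hin]
      obtain ⟨hsh, hent⟩ := ih (pvBump cs ((r : Int) + d.1).toNat ((c : Int) + d.2).toNat)
        (pvShape_bump h w cs _ _ hs)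
      refine ⟨hsh, ?_⟩
      rw [hent, pvEntry_bump h w cs _ _ R C hs hR hC, List.countP_cons]
      by_cases hp : (r : Int) + d.1 = (R : Int) ∧ (c : Int) + d.2 = (C : Int)
      · rw [if_pos (by omega), if_pos (by simpa using hp)]
        push_cast; ring
      · rw [if_neg (by omega), if_neg (by simpa using hp)]
        push_cast; ring
    · rw [if_neg hin]
      obtain ⟨hsh, hent⟩ := ih cs hs
      refine ⟨hsh, ?_⟩
      rw [hent, List.countP_cons, if_neg (by simp only [decide_eq_true_eq]; omega)]
      push_cast; ring

theorem pvScatter_entry (h w R C r c : Nat) (hR : R < h) (hC : C < w)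
    (cs : List (List Int)) (hs : pvShape h w cs) :
    pvShape h w (pvScatter h w cs r c) ∧
      pvEntry (pvScatter h w cs r c) R C = pvEntry cs R C + pvHits R C r c := by
  exact pvScatter_fold h w R C r c hR hC pvDeltas cs hs

def pvContrib (grid : List String) (R C r c : Nat) : Int :=
  if pvCell grid r c = 'o' then pvHits R C r c else 0

theorem pvInner_fold (grid : List String) (h w R C r : Nat) (hR : R < h) (hC : C < w)
    (xs : List Nat) :
    ∀ (cs : List (List Int)), pvShape h w cs →
      pvShape h w (xs.foldl (fun cs c => if pvCell grid r c = 'o' then pvScatter h w cs r c else cs) cs) ∧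
      pvEntry (xs.foldl (fun cs c => if pvCell grid r c = 'o' then pvScatter h w cs r c else cs) cs) R C
        = pvEntry cs R C + (xs.map (fun c => pvContrib grid R C r c)).sum := by
  induction xs with
  | nil => intro cs hs; exact ⟨hs, by simp⟩
  | cons c ct ih =>
    intro cs hs
    rw [List.foldl_cons]
    by_cases ho : pvCell grid r c = 'o'
    · rw [if_pos ho]
      obtain ⟨hsh1, hent1⟩ := pvScatter_entry h w R C r c hR hC cs hs
      obtain ⟨hsh, hent⟩ := ih (pvScatter h w cs r c) hsh1
      refine ⟨hsh, ?_⟩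
      rw [hent, hent1, List.map_cons, List.sum_cons, pvContrib, if_pos ho]
      ring
    · rw [if_neg ho]
      obtain ⟨hsh, hent⟩ := ih cs hs
      refine ⟨hsh, ?_⟩
      rw [hent, List.map_cons, List.sum_cons, pvContrib, if_neg ho]
      ring

theorem pvOuter_fold (grid : List String) (h w R C : Nat) (hR : R < h) (hC : C < w)
    (rs : List Nat) :
    ∀ (cs : List (List Int)), pvShape h w cs →
      pvShape h w (rs.foldl (fun cs r => (List.range w).foldl
          (fun cs c => if pvCell grid r c = 'o' then pvScatter h w cs r c else cs) cs) cs) ∧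
      pvEntry (rs.foldl (fun cs r => (List.range w).foldl
          (fun cs c => if pvCell grid r c = 'o' then pvScatter h w cs r c else cs) cs) cs) R C
        = pvEntry cs R C + (rs.map (fun r => ((List.range w).map (fun c => pvContrib grid R C r c)).sum)).sum := by
  induction rs with
  | nil => intro cs hs; exact ⟨hs, by simp⟩
  | cons r rt ih =>
    intro cs hs
    rw [List.foldl_cons]
    obtain ⟨hsh1, hent1⟩ := pvInner_fold grid h w R C r hR hC (List.range w) cs hs
    obtain ⟨hsh, hent⟩ := ih _ hsh1
    refine ⟨hsh, ?_⟩
    rw [hent, hent1, List.map_cons, List.sum_cons]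
    ring

theorem pvShape_replicate (h w : Nat) : pvShape h w (List.replicate h (List.replicate w (0 : Int))) := by
  refine ⟨by simp, fun k hk => ?_⟩
  rw [List.getD_eq_getElem?_getD, List.getElem?_replicate, if_pos hk]
  simp

theorem pvCounts_entry (grid : List String) (h w R C : Nat) (hR : R < h) (hC : C < w) :
    pvEntry ((List.range h).foldl (fun cs r => (List.range w).foldl
        (fun cs c => if pvCell grid r c = 'o' then pvScatter h w cs r c else cs) cs)
        (List.replicate h (List.replicate w (0 : Int)))) R C
      = ((List.range h).map (fun r => ((List.range w).map (fun c => pvContrib grid R C r c)).sum)).sum := by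
  obtain ⟨_, hent⟩ := pvOuter_fold grid h w R C hR hC (List.range h) _ (pvShape_replicate h w)
  rw [hent]
  have : pvEntry (List.replicate h (List.replicate w (0 : Int))) R C = 0 := by
    simp [pvEntry, List.getD_eq_getElem?_getD, hR, hC]
  rw [this, zero_add]

theorem pvSum_range_list (n : Nat) (f : Nat → Int) :
    ((List.range n).map f).sum = ∑ i ∈ Finset.range n, f i := by
  induction n with
  | zero => simp
  | succ m ih => rw [List.range_succ, Finset.sum_range_succ, List.map_append, List.sum_append, ih]; simp

theorem pvCollapse (grid : List String) (h w R C : Nat) (_hR : R < h) (_hC : C < w) (d1 d2 : Int) :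
    (∑ r ∈ Finset.range h, ∑ c ∈ Finset.range w,
      (if pvCell grid r c = 'o' ∧ (r : Int) + d1 = (R : Int) ∧ (c : Int) + d2 = (C : Int) then (1 : Int) else 0))
    = if 0 ≤ (R : Int) - d1 ∧ (R : Int) - d1 < (h : Int) ∧ 0 ≤ (C : Int) - d2 ∧ (C : Int) - d2 < (w : Int)
        ∧ pvCell grid ((R : Int) - d1).toNat ((C : Int) - d2).toNat = 'o' then (1 : Int) else 0 := by
  by_cases hb : 0 ≤ (R : Int) - d1 ∧ (R : Int) - d1 < (h : Int) ∧ 0 ≤ (C : Int) - d2 ∧ (C : Int) - d2 < (w : Int)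
  · set a : Nat := ((R : Int) - d1).toNat with ha
    set b : Nat := ((C : Int) - d2).toNat with hb2
    have hcond : ∀ r c : Nat, (pvCell grid r c = 'o' ∧ (r : Int) + d1 = (R : Int) ∧ (c : Int) + d2 = (C : Int))
        ↔ (r = a ∧ c = b ∧ pvCell grid r c = 'o') := by
      intro r c
      constructor
      · rintro ⟨hx, h1, h2⟩; exact ⟨by omega, by omega, hx⟩
      · rintro ⟨h1, h2, hx⟩; exact ⟨hx, by omega, by omega⟩
    calc (∑ r ∈ Finset.range h, ∑ c ∈ Finset.range w,
        (if pvCell grid r c = 'o' ∧ (r : Int) + d1 = (R : Int) ∧ (c : Int) + d2 = (C : Int) then (1 : Int) else 0))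
        = ∑ r ∈ Finset.range h, ∑ c ∈ Finset.range w,
            (if r = a then (if c = b then (if pvCell grid r c = 'o' then (1 : Int) else 0) else 0) else 0) := by
          refine Finset.sum_congr rfl fun r _ => Finset.sum_congr rfl fun c _ => ?_
          simp only [hcond r c]
          split_ifs <;> simp_all
      _ = ∑ r ∈ Finset.range h,
            (if r = a then ∑ c ∈ Finset.range w, (if c = b then (if pvCell grid r c = 'o' then (1 : Int) else 0) else 0) else 0) := by
          refine Finset.sum_congr rfl fun r _ => ?_
          split_ifs <;> simp
      _ = if pvCell grid a b = 'o' then (1 : Int) else 0 := by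
          rw [Finset.sum_ite_eq' (Finset.range h) a
            (fun r => ∑ c ∈ Finset.range w, (if c = b then (if pvCell grid r c = 'o' then (1 : Int) else 0) else 0))]
          rw [if_pos (by simp only [Finset.mem_range]; omega)]
          rw [Finset.sum_ite_eq' (Finset.range w) b (fun c => if pvCell grid a c = 'o' then (1 : Int) else 0)]
          rw [if_pos (by simp only [Finset.mem_range]; omega)]
      _ = _ := by
          obtain ⟨p1, p2, p3, p4⟩ := hb
          by_cases hcell : pvCell grid a b = 'o'
          · rw [if_pos hcell, if_pos ⟨p1, p2, p3, p4, hcell⟩]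
          · rw [if_neg hcell, if_neg (by rintro ⟨_, _, _, _, hx⟩; exact hcell hx)]
  · rw [if_neg (by tauto)]
    refine Finset.sum_eq_zero fun r hr => Finset.sum_eq_zero fun c hc => ?_
    rw [if_neg]
    rintro ⟨_, h1, h2⟩
    simp only [Finset.mem_range] at hr hc
    omega

theorem pvContrib_expand (grid : List String) (R C r c : Nat) :
    pvContrib grid R C r c =
      (if pvCell grid r c = 'o' ∧ (r : Int) + 0 = (R : Int) ∧ (c : Int) + 1 = (C : Int) then (1 : Int) else 0)
    + (if pvCell grid r c = 'o' ∧ (r : Int) + 0 = (R : Int) ∧ (c : Int) + (-1) = (C : Int) then (1 : Int) else 0)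
    + (if pvCell grid r c = 'o' ∧ (r : Int) + 1 = (R : Int) ∧ (c : Int) + 0 = (C : Int) then (1 : Int) else 0)
    + (if pvCell grid r c = 'o' ∧ (r : Int) + (-1) = (R : Int) ∧ (c : Int) + 0 = (C : Int) then (1 : Int) else 0)
    + (if pvCell grid r c = 'o' ∧ (r : Int) + 1 = (R : Int) ∧ (c : Int) + 1 = (C : Int) then (1 : Int) else 0)
    + (if pvCell grid r c = 'o' ∧ (r : Int) + (-1) = (R : Int) ∧ (c : Int) + 1 = (C : Int) then (1 : Int) else 0)
    + (if pvCell grid r c = 'o' ∧ (r : Int) + 1 = (R : Int) ∧ (c : Int) + (-1) = (C : Int) then (1 : Int) else 0)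
    + (if pvCell grid r c = 'o' ∧ (r : Int) + (-1) = (R : Int) ∧ (c : Int) + (-1) = (C : Int) then (1 : Int) else 0) := by
  by_cases ho : pvCell grid r c = 'o'
  · simp only [pvContrib, pvHits, pvDeltas, List.countP_cons, List.countP_nil, ho, if_pos,
      decide_eq_true_eq, true_and]
    push_cast
    ring
  · simp [pvContrib, ho]

theorem pvIfAdd (p : Prop) [Decidable p] (t : Int) :
    (if p then t + 1 else t) = t + (if p then (1 : Int) else 0) := by
  split_ifs <;> ring

theorem pvGuard (grid : List String) (h' w' R C : Nat) (d1 d2 : Int) (Q : Prop) [Decidable Q] (a b : Nat)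
    (hiff : (0 ≤ (R : Int) - d1 ∧ (R : Int) - d1 < (h' : Int) ∧ 0 ≤ (C : Int) - d2 ∧ (C : Int) - d2 < (w' : Int)) ↔ Q)
    (hab : Q → ((R : Int) - d1).toNat = a ∧ ((C : Int) - d2).toNat = b) :
    (if 0 ≤ (R : Int) - d1 ∧ (R : Int) - d1 < (h' : Int) ∧ 0 ≤ (C : Int) - d2 ∧ (C : Int) - d2 < (w' : Int)
        ∧ pvCell grid ((R : Int) - d1).toNat ((C : Int) - d2).toNat = 'o' then (1 : Int) else 0)
    = if Q ∧ pvCell grid a b = 'o' then (1 : Int) else 0 := by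
  by_cases hq : Q
  · obtain ⟨ea, eb⟩ := hab hq
    rw [ea, eb]
    exact if_congr ⟨fun h => ⟨hq, h.2.2.2.2⟩,
      fun h => ⟨(hiff.mpr hq).1, (hiff.mpr hq).2.1, (hiff.mpr hq).2.2.1, (hiff.mpr hq).2.2.2, h.2⟩⟩ rfl rfl
  · rw [if_neg (fun h => hq (hiff.mp ⟨h.1, h.2.1, h.2.2.1, h.2.2.2.1⟩)), if_neg (fun h => hq h.1)]

theorem pvSum_eq_nn (grid : List String) (R C : Nat)
    (hR : R < grid.length) (hC : C < (grid.headD "").length) :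
    ((List.range grid.length).map (fun r =>
      ((List.range (grid.headD "").length).map (fun c => pvContrib grid R C r c)).sum)).sum
    = num_neighbours grid R C := by
  have h2 : ((List.range grid.length).map (fun r =>
      ((List.range (grid.headD "").length).map (fun c => pvContrib grid R C r c)).sum)).sum
      = ∑ r ∈ Finset.range grid.length, ∑ c ∈ Finset.range (grid.headD "").length, pvContrib grid R C r c := by
    rw [pvSum_range_list]
    exact Finset.sum_congr rfl fun r _ => pvSum_range_list _ _
  rw [h2]
  simp only [pvContrib_expand grid R C, Finset.sum_add_distrib]
  rw [pvCollapse grid _ _ R C hR hC 0 1, pvCollapse grid _ _ R C hR hC 0 (-1),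
      pvCollapse grid _ _ R C hR hC 1 0, pvCollapse grid _ _ R C hR hC (-1) 0,
      pvCollapse grid _ _ R C hR hC 1 1, pvCollapse grid _ _ R C hR hC (-1) 1,
      pvCollapse grid _ _ R C hR hC 1 (-1), pvCollapse grid _ _ R C hR hC (-1) (-1)]
  simp only [num_neighbours, pvIfAdd]
  rw [pvGuard grid _ _ R C 0 1 (0 < C) R (C - 1) (by omega) (fun _ => ⟨by omega, by omega⟩),
      pvGuard grid _ _ R C 0 (-1) (C < (grid.headD "").length - 1) R (C + 1) (by omega) (fun _ => ⟨by omega, by omega⟩),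
      pvGuard grid _ _ R C 1 0 (0 < R) (R - 1) C (by omega) (fun _ => ⟨by omega, by omega⟩),
      pvGuard grid _ _ R C (-1) 0 (R < grid.length - 1) (R + 1) C (by omega) (fun _ => ⟨by omega, by omega⟩),
      pvGuard grid _ _ R C 1 1 (0 < R ∧ 0 < C) (R - 1) (C - 1) (by omega) (fun _ => ⟨by omega, by omega⟩),
      pvGuard grid _ _ R C (-1) 1 (0 < C ∧ R < grid.length - 1) (R + 1) (C - 1) (by omega) (fun _ => ⟨by omega, by omega⟩),
      pvGuard grid _ _ R C 1 (-1) (0 < R ∧ C < (grid.headD "").length - 1) (R - 1) (C + 1) (by omega) (fun _ => ⟨by omega, by omega⟩),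
      pvGuard grid _ _ R C (-1) (-1) (C < (grid.headD "").length - 1 ∧ R < grid.length - 1) (R + 1) (C + 1) (by omega) (fun _ => ⟨by omega, by omega⟩)]
  simp only [and_assoc]
  ring

theorem mirko_location_main (grid : List String) :
    mirko_location grid = mirko_location_alt grid := by
  unfold mirko_location mirko_location_alt
  dsimp only
  have hcnt : ∀ (r c : Nat), r < grid.length → c < (grid.headD "").length →
      pvEntry ((List.range grid.length).foldl (fun cs r => (List.range (grid.headD "").length).foldl
        (fun cs c => if pvCell grid r c = 'o' then pvScatter grid.length (grid.headD "").length cs r c else cs) cs)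
        (List.replicate grid.length (List.replicate (grid.headD "").length (0 : Int)))) r c
      = num_neighbours grid r c := by
    intro r c hr hc
    rw [pvCounts_entry grid grid.length (grid.headD "").length r c hr hc]
    exact pvSum_eq_nn grid r c hr hc
  have hst : (List.range grid.length).foldl (fun s row =>
      (List.range (grid.headD "").length).foldl (fun s col =>
        if pvCell grid row col = '.' then
          if num_neighbours grid row col > s.2.2 then ((row : Int), (col : Int), num_neighbours grid row col) else s
        else s) s) ((-1 : Int), (-1 : Int), (0 : Int))
      = (List.range grid.length).foldl (fun s r =>
      (List.range (grid.headD "").length).foldl (fun s c =>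
        if pvCell grid r c = '.' ∧ pvEntry ((List.range grid.length).foldl (fun cs r => (List.range (grid.headD "").length).foldl
            (fun cs c => if pvCell grid r c = 'o' then pvScatter grid.length (grid.headD "").length cs r c else cs) cs)
            (List.replicate grid.length (List.replicate (grid.headD "").length (0 : Int)))) r c > s.2.2
          then ((r : Int), (c : Int), pvEntry ((List.range grid.length).foldl (fun cs r => (List.range (grid.headD "").length).foldl
            (fun cs c => if pvCell grid r c = 'o' then pvScatter grid.length (grid.headD "").length cs r c else cs) cs)
            (List.replicate grid.length (List.replicate (grid.headD "").length (0 : Int)))) r c) else s) s)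
      ((-1 : Int), (-1 : Int), (0 : Int)) := by
    refine PySem.List.foldl_congr_mem _ _ _ _ (fun s r hr => ?_)
    refine PySem.List.foldl_congr_mem _ _ _ _ (fun s' c hc => ?_)
    rw [List.mem_range] at hr hc
    rw [hcnt r c hr hc]
    by_cases hdot : pvCell grid r c = '.'
    · simp only [hdot, true_and, if_true]
    · simp only [hdot, false_and, if_false]
  rw [hst]

-- ===== VERDICT (by name: the statement is the Claim_ definition above) =====
theorem mirko_location_spec : Claim_equal_mirko_location := by
  intro grid _ _
  exact mirko_location_main grid
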